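-- pv_equiv track=rewrite | github.com/idaholab/raven | rook/trees/TreeStructure.py | __split_line_comment
-- ===== SOURCE A (Python) =====
-- def __split_line_comment(line):
--   """
--     Splits a line into the data part and the comment part
--     @ In, line, string, line
--     @ Out, (data, comment), (string, string), The comment part maybe empty
--   """
--   data = ''
--   comment = ''
--   in_string = False
--   in_comment = False
--   for char in line:
--     if char == "'":
--       in_string = not in_string
--     if char == '#' and not in_string:
--       in_comment = True
--     if in_comment:
--       comment += char
--     else:
--       data += char
--   return (data, comment)
-- ===== SOURCE B (Python) =====
-- def __split_line_comment(line):
--   """Find the first '#' outside single quotes by jumping over quoted spans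
--   with str.find, then split the line once with slices."""
--   i = 0
--   n = len(line)
--   while i < n:
--     c = line[i]
--     if c == "'":
--       j = line.find("'", i + 1)
--       i = n if j == -1 else j + 1
--     elif c == '#':
--       return (line[:i], line[i:])
--     else:
--       i += 1
--   return (line, '')
-- ===== Notes on version B (the rewrite author's own statement) =====
-- stated objective: alternative
-- what changed: Replaces A's char-by-char state machine (four state variables, building both output strings by concatenation) with index jumping: skip over each single-quoted span via one str.find call and split the line once with two slices at the first unquoted comment marker.
import Mathlib
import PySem

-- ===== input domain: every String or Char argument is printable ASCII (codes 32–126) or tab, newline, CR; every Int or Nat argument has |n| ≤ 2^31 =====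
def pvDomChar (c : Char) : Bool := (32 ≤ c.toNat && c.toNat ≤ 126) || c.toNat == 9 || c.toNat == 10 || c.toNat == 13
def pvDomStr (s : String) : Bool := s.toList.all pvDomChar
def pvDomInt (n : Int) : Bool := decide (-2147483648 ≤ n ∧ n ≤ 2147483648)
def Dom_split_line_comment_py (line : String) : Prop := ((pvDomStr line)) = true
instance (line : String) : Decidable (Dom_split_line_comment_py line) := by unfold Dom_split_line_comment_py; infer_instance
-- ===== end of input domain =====

-- B replaces A's four-variable char-by-char state machine by find-based jumps over
-- quoted spans and a single two-slice split at the first unquoted '#' (objective: alternative).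

-- ===== PORT A =====
-- state = (data, comment, in_string, in_comment); strings kept as List Char
def stepA (st : List Char × List Char × Bool × Bool) (c : Char) :
    List Char × List Char × Bool × Bool :=
  let data := st.1
  let comment := st.2.1
  let in_string := if c = '\'' then !st.2.2.1 else st.2.2.1
  let in_comment := if c = '#' ∧ in_string = false then true else st.2.2.2
  if in_comment then (data, comment ++ [c], in_string, in_comment)
  else (data ++ [c], comment, in_string, in_comment)

def split_line_comment_py (line : String) : String × String :=
  let r := line.toList.foldl stepA ([], [], false, false)
  (String.mk r.1, String.mk r.2.1)

-- ===== PORT B =====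
-- while-loop of Source B as recursion on the index i; line.find("'", i+1) is
-- PySem.Chars.findFrom; the final slices line[:i]/line[i:] (0 ≤ i ≤ len) are take/drop.
def goB (s : List Char) (i : Nat) : String × String :=
  if h : i < s.length then
    let c := s[i]
    if c = '\'' then
      let j := PySem.Chars.findFrom s ['\''] ((i : Int) + 1) none
      if hj : j = -1 then goB s s.length
      else goB s (j.toNat + 1)
    else if c = '#' then (String.mk (s.take i), String.mk (s.drop i))
    else goB s (i + 1)
  else (String.mk s, "")
termination_by s.length - i
decreasing_by
  · omega
  · have hk : i + 1 ≤ s.length := h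
    have := (PySem.Chars.findFrom_natCast_spec s ['\''] (i+1) hk (by
      push_cast
      exact hj)).1
    push_cast at this ⊢
    omega
  · omega

def split_line_comment_py_alt (line : String) : String × String :=
  goB line.toList 0

-- ===== PRECONDITION & SPEC =====
def Spec_split_line_comment_py (line : String) (out : String × String) : Prop := out = split_line_comment_py_alt line
instance (line : String) (out : String × String) : Decidable (Spec_split_line_comment_py line out) := by unfold Spec_split_line_comment_py; infer_instance

-- ===== CLAIM (what is proved, stated in full; the proofs are below) =====
def Claim_equal_split_line_comment_py : Prop := ∀ (line : String), Dom_split_line_comment_py line → Spec_split_line_comment_py line (split_line_comment_py line)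

-- ===== LEMMAS AND PROOFS =====

-- index (counted from the front) of the first '#' that is outside single quotes,
-- given the current in_string state; none if there is no such '#'
def cutAux : List Char → Bool → Option Nat
  | [], _ => none
  | c :: cs, s =>
    if c = '#' ∧ (if c = '\'' then !s else s) = false then some 0
    else (cutAux cs (if c = '\'' then !s else s)).map (· + 1)

theorem cutAux_true_none (t : List Char) (h : '\'' ∉ t) : cutAux t true = none := by
  induction t with
  | nil => rfl
  | cons c cs ih =>
    have hc : c ≠ '\'' := fun hc => h (hc ▸ List.mem_cons_self)
    simp [cutAux, hc, ih (fun hm => h (List.mem_cons_of_mem _ hm))]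

theorem cutAux_true_block (p r : List Char) (h : '\'' ∉ p) :
    cutAux (p ++ '\'' :: r) true = (cutAux r false).map (· + (p.length + 1)) := by
  induction p with
  | nil => simp [cutAux]
  | cons c cs ih =>
    have hc : c ≠ '\'' := fun hc => h (hc ▸ List.mem_cons_self)
    simp only [List.cons_append, cutAux, if_neg hc]
    rw [if_neg (by simp)]
    rw [ih (fun hm => h (List.mem_cons_of_mem _ hm))]
    cases cutAux r false <;> simp <;> omega

theorem foldl_stepA_true (cs : List Char) (d cm : List Char) (s : Bool) :
    ∃ s', cs.foldl stepA (d, cm, s, true) = (d, cm ++ cs, s', true) := by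
  induction cs generalizing d cm s with
  | nil => exact ⟨s, by simp⟩
  | cons c cs ih =>
    obtain ⟨s', hs'⟩ := ih (cm := cm ++ [c]) (d := d) (s := if c = '\'' then !s else s)
    refine ⟨s', ?_⟩
    simp only [List.foldl_cons, stepA]
    rw [ite_self, if_pos rfl, hs']
    simp

theorem foldl_stepA_main (cs : List Char) (d cm : List Char) (s : Bool) :
    ((cs.foldl stepA (d, cm, s, false)).1, (cs.foldl stepA (d, cm, s, false)).2.1) =
      match cutAux cs s with
      | some k => (d ++ cs.take k, cm ++ cs.drop k)
      | none => (d ++ cs, cm) := by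
  induction cs generalizing d cm s with
  | nil => simp [cutAux]
  | cons c cs ih =>
    by_cases hc : c = '#' ∧ (if c = '\'' then !s else s) = false
    · obtain ⟨s', hs'⟩ := foldl_stepA_true cs d (cm ++ [c]) (if c = '\'' then !s else s)
      simp only [List.foldl_cons, stepA]
      rw [if_pos hc, if_pos rfl, hs']
      obtain ⟨hc1, hc2⟩ := hc
      subst hc1
      rw [if_neg (by decide)] at hc2
      subst hc2
      simp [cutAux]
    · simp only [List.foldl_cons, stepA]
      rw [if_neg hc, if_neg (by simp)]
      rw [ih]
      simp only [cutAux, if_neg hc]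
      cases cutAux cs (if c = '\'' then !s else s) <;> simp

theorem singleton_prefix_drop {t : List Char} {a : Char} {i : Nat} (hi : i < t.length)
    (h : t[i] = a) : [a] <+: t.drop i := by
  rw [List.drop_eq_getElem_cons hi, h]
  exact ⟨t.drop (i+1), rfl⟩

theorem goB_eq (s : List Char) (i : Nat) :
    goB s i = match cutAux (s.drop i) false with
      | some k => (String.mk (s.take (i + k)), String.mk (s.drop (i + k)))
      | none => (String.mk s, "") := by
  by_cases h : i < s.length
  · have hdrop : s.drop i = s[i] :: s.drop (i + 1) := List.drop_eq_getElem_cons h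
    by_cases hq : s[i] = '\''
    · -- quote: analyse the find
      have hk : i + 1 ≤ s.length := h
      have hfr : PySem.Chars.findFrom s ['\''] ((i : Int) + 1) none =
          if PySem.Chars.find (s.drop (i+1)) ['\''] = -1 then -1
          else (i+1 : Nat) + PySem.Chars.find (s.drop (i+1)) ['\''] := by
        have := PySem.Chars.findFrom_natCast s ['\''] (i+1) hk
        push_cast at this ⊢
        exact this
      set t := s.drop (i + 1) with ht
      by_cases hf : PySem.Chars.find t ['\''] = -1
      · -- no closing quote: B jumps to the end; A's cut never fires
        have hnot : '\'' ∉ t := by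
          intro hm
          obtain ⟨l1, l2, hsplit⟩ := List.append_of_mem hm
          exact (PySem.Chars.find_eq_neg_one_iff t ['\'']).1 hf
            ⟨l1, l2, by rw [hsplit]; simp⟩
        have hcut : cutAux (s.drop i) false = none := by
          rw [hdrop, hq]
          simp [cutAux, cutAux_true_none t hnot]
        rw [goB, dif_pos h, if_pos hq, hcut]
        rw [hfr, if_pos hf]
        rw [goB]
        simp
      · -- closing quote at offset m within t
        have hge : 0 ≤ PySem.Chars.find t ['\''] := by
          rcases lt_or_ge (PySem.Chars.find t ['\'']) 0 with hlt | hge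
          · exfalso; apply hf
            have := PySem.Chars.neg_one_le_find t ['\'']
            omega
          · exact hge
        set m := (PySem.Chars.find t ['\'']).toNat with hm
        have hspec := PySem.Chars.find_spec (s := t) (sub := ['\'']) hge
        have hmlt : m < t.length := by
          have h1 := hspec.1
          rcases h1 with ⟨r, hr⟩
          have : (t.drop m).length ≥ 1 := by
            rw [← hr]; simp
          simp at this
          omega
        have htm : t[m] = '\'' := by
          rcases hspec.1 with ⟨r, hr⟩
          have : t.drop m = '\'' :: r := by rw [← hr]; rfl
          have h2 : t.drop m = t[m] :: t.drop (m+1) := List.drop_eq_getElem_cons hmlt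
          rw [h2] at this
          exact (List.cons.injEq _ _ _ _ ▸ this).1
        have hnp : '\'' ∉ t.take m := by
          intro hmem
          obtain ⟨j, hj, hje⟩ := List.mem_iff_getElem.1 hmem
          have hj' := hj
          simp only [List.length_take, lt_min_iff] at hj'
          have hjm : j < m := hj'.1
          have hjt : j < t.length := hj'.2
          have : t[j] = '\'' := by
            have := List.getElem_take (xs := t) (i := j) (h := hj)
            rw [← this]; exact hje
          exact hspec.2 j hjm (singleton_prefix_drop hjt this)
        have htdecomp : t = t.take m ++ '\'' :: t.drop (m+1) := by
          conv_lhs => rw [← List.take_append_drop m t]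
          rw [List.drop_eq_getElem_cons hmlt, htm]
        have hcut : cutAux (s.drop i) false =
            (cutAux (t.drop (m+1)) false).map (· + (m + 2)) := by
          rw [hdrop, hq]
          simp only [cutAux]
          rw [if_neg (by simp)]
          simp only [if_true, Bool.not_false]
          conv_lhs => rw [htdecomp]
          rw [cutAux_true_block _ _ hnp]
          have hlen : (t.take m).length = m := by simp; omega
          cases cutAux (t.drop (m+1)) false <;> simp [hlen] <;> omega
        have hcond : ¬(((i + 1 : Nat) : Int) + PySem.Chars.find t ['\''] = -1) := by omega
        have hIdx : ((((i + 1 : Nat) : Int) + PySem.Chars.find t ['\'']).toNat + 1) = i + m + 2 := by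
          omega
        rw [goB, dif_pos h, if_pos hq, hfr]
        simp only [if_neg hf]
        rw [dif_neg hcond, hIdx, goB_eq s (i + m + 2)]
        have hdd : s.drop (i + m + 2) = t.drop (m + 1) := by
          rw [ht, List.drop_drop]
          congr 1
          omega
        rw [hcut, hdd]
        cases cutAux (t.drop (m+1)) false with
        | none => rfl
        | some k =>
          simp only [Option.map_some]
          have : i + (k + (m + 2)) = i + m + 2 + k := by omega
          rw [this]
    · by_cases hh : s[i] = '#'
      · have hcut : cutAux (s.drop i) false = some 0 := by
          rw [hdrop, hh]
          simp [cutAux]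
        rw [goB, dif_pos h, if_neg (by rw [hh]; intro hc; exact hq (hh ▸ hc)), if_pos hh, hcut]
        simp
      · have hcut : cutAux (s.drop i) false =
            (cutAux (s.drop (i+1)) false).map (· + 1) := by
          rw [hdrop]
          simp [cutAux, hq, hh]
        rw [goB, dif_pos h, if_neg hq, if_neg hh, goB_eq s (i+1), hcut]
        cases cutAux (s.drop (i+1)) false with
        | none => rfl
        | some k =>
          simp only [Option.map_some]
          have : i + (k + 1) = i + 1 + k := by omega
          rw [this]
  · have hdrop : s.drop i = [] := List.drop_eq_nil_of_le (by omega)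
    rw [goB, dif_neg h, hdrop]
    rfl
termination_by s.length - i
decreasing_by
  · omega
  · omega

-- ===== VERDICT (by name: the statement is the Claim_ definition above) =====
theorem split_line_comment_py_spec : Claim_equal_split_line_comment_py := by
  intro line _
  unfold Spec_split_line_comment_py split_line_comment_py split_line_comment_py_alt
  rw [goB_eq]
  have hmain := foldl_stepA_main line.toList [] [] false
  simp only [List.nil_append] at hmain
  simp only [List.drop_zero, Nat.zero_add]
  cases hcut : cutAux line.toList false with
  | none =>
    rw [hcut] at hmain
    simp only at hmain
    rw [Prod.mk.injEq] at hmain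
    simp [hmain.1, hmain.2]
    rfl
  | some k =>
    rw [hcut] at hmain
    simp only at hmain
    rw [Prod.mk.injEq] at hmain
    simp [hmain.1, hmain.2]
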